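-- pv_equiv track=rewrite | github.com/Unchpokable/GenealogicCPP | src/genealogic/tree.py | collect_reachable_edges
-- ===== SOURCE A (Python) =====
-- from collections import defaultdict, deque
--
-- def collect_reachable_edges(
--     root_name: str,
--     children_map: dict[str, list[str]],
-- ) -> tuple[set[str], list[tuple[str, str]]]:
--     """BFS from root. Return (all_node_names, all_edges) as a full DAG."""
--     nodes: set[str] = {root_name}
--     edges: list[tuple[str, str]] = []
--     queue: deque[str] = deque([root_name])
--
--     while queue:
--         parent = queue.popleft()
--         for child in sorted(children_map.get(parent, [])):
--             edges.append((parent, child))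
--             if child not in nodes:
--                 nodes.add(child)
--                 queue.append(child)
--
--     return nodes, edges
-- ===== SOURCE B (Python) =====
-- def collect_reachable_edges(root_name, children_map):
--     """Pointer-driven BFS: a single growing list doubles as visited structure and
--     queue (the cursor i walks it while unseen children are appended at the end);
--     the edge list is rebuilt afterwards in a separate pass over that order."""
--     order = [root_name]
--     i = 0
--     while i < len(order):
--         for c in sorted(children_map.get(order[i], [])):
--             if c not in order:
--                 order.append(c)
--         i += 1
--     edges = [(p, c) for p in order for c in sorted(children_map.get(p, []))]
--     return set(order), edges
-- ===== Notes on version B (the rewrite author's own statement) =====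
-- stated objective: alternative
-- what changed: Replaces the deque+visited-set loop that interleaves edge emission with discovery by an index-pointer BFS over a single growing list (the list is both the queue and the visited structure, walked by a cursor), followed by a separate pass that rebuilds the edge list from that visitation order.
import Mathlib
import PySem

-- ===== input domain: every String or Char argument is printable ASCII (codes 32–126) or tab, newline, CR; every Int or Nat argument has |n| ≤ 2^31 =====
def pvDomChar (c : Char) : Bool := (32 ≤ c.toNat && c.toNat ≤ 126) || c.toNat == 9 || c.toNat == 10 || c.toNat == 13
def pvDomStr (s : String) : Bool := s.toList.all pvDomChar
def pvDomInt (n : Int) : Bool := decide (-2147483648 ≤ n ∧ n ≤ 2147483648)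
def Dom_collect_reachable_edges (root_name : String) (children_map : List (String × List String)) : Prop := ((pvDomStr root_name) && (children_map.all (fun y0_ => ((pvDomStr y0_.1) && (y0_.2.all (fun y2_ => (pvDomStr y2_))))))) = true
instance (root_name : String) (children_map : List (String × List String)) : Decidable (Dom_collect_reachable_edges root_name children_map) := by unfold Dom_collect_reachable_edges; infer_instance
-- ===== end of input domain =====

-- B replaces A's deque + visited-set loop (edges emitted while discovering) by an index-pointer
-- BFS over one growing list (the list is simultaneously queue and visited structure), with the
-- edge list rebuilt in a separate pass from that order (alternative decomposition, not faster).

-- sorted(children_map.get(p, [])) — both Pythons call this verbatim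
def pvSrt (children : PySem.Dict String (List String)) (p : String) : List String :=
  PySem.List.sorted (children.getD p []) (fun c => c) false

-- ===== PORT A =====
-- one iteration of A's inner 'for child in sorted(...)' body
def pvAStep1 (parent child : String)
    (st : PySem.Set String × List (String × String) × List String) :
    PySem.Set String × List (String × String) × List String :=
  let e := st.2.1 ++ [(parent, child)]
  if PySem.Set.contains st.1 child then (st.1, e, st.2.2)
  else (PySem.Set.add st.1 child, e, st.2.2 ++ [child])

-- A's inner for-loop over the sorted children of one dequeued parent
def pvAStep (children : PySem.Dict String (List String)) (parent : String)
    (st : PySem.Set String × List (String × String) × List String) :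
    PySem.Set String × List (String × String) × List String :=
  (pvSrt children parent).foldl (fun st c => pvAStep1 parent c st) st

-- A's 'while queue' loop; the fuel only makes the recursion total (it is provably never exhausted)
def pvBfsA (children : PySem.Dict String (List String)) :
    Nat → PySem.Set String × List (String × String) × List String →
    PySem.Set String × List (String × String)
  | 0, st => (st.1, st.2.1)
  | f + 1, st =>
    match st.2.2 with
    | [] => (st.1, st.2.1)
    | p :: rest => pvBfsA children f (pvAStep children p (st.1, st.2.1, rest))

def collect_reachable_edges (root_name : String) (children_map : List (String × List String)) : List String × (List (String × String)) :=
  let children := PySem.Dict.ofList children_map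
  pvBfsA children (1 + (children_map.map (fun kv => kv.2.length)).sum)
    (PySem.Set.ofList [root_name], [], [root_name])

-- ===== PORT B =====
-- B's 'if c not in order: order.append(c)'
def pvIns (order : List String) (c : String) : List String :=
  if order.contains c then order else order ++ [c]

-- B's 'for c in sorted(...)' scan at one cursor position
def pvNext (children : PySem.Dict String (List String)) (order : List String) (p : String) :
    List String :=
  (pvSrt children p).foldl pvIns order

-- B's 'while i < len(order)' cursor loop; fuel only for totality, provably never exhausted
def pvGrow (children : PySem.Dict String (List String)) :
    Nat → List String → Nat → List String
  | 0, order, _ => order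
  | f + 1, order, i =>
    if h : i < order.length then pvGrow children f (pvNext children order order[i]) (i + 1)
    else order

def collect_reachable_edges_alt (root_name : String) (children_map : List (String × List String)) : List String × (List (String × String)) :=
  let children := PySem.Dict.ofList children_map
  let ord := pvGrow children (1 + (children_map.map (fun kv => kv.2.length)).sum) [root_name] 0
  (ord, ord.flatMap (fun p => (pvSrt children p).map (fun c => (p, c))))

-- ===== PRECONDITION & SPEC =====
def Spec_collect_reachable_edges (root_name : String) (children_map : List (String × List String)) (out : List String × (List (String × String))) : Prop := out = collect_reachable_edges_alt root_name children_map
instance (root_name : String) (children_map : List (String × List String)) (out : List String × (List (String × String))) : Decidable (Spec_collect_reachable_edges root_name children_map out) := by unfold Spec_collect_reachable_edges; infer_instance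

-- ===== CLAIM =====
def Claim_equal_collect_reachable_edges : Prop := ∀ (root_name : String) (children_map : List (String × List String)), Dom_collect_reachable_edges root_name children_map → Spec_collect_reachable_edges root_name children_map (collect_reachable_edges root_name children_map)

-- ===== LEMMAS AND PROOFS =====

-- edges contributed by one parent
def pvEdge (children : PySem.Dict String (List String)) (p : String) : List (String × String) :=
  (pvSrt children p).map (fun c => (p, c))

-- number of elements of allc not yet in the order list
def pvUnv (allc : List String) (n : List String) : Nat :=
  (allc.filter (fun c => !(n.contains c))).length

-- A's set primitives on the underlying list, spelled as list operations
lemma pvSetContains (s : PySem.Set String) (c : String) :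
    PySem.Set.contains s c = List.contains s c := rfl

lemma pvSetAdd (s : PySem.Set String) (c : String) :
    PySem.Set.add s c = (if List.contains s c then s else s ++ [c]) := rfl

lemma pvBfsA_nil (ch : PySem.Dict String (List String)) (f : Nat) (n : PySem.Set String)
    (e : List (String × String)) : pvBfsA ch f (n, e, []) = (n, e) := by
  cases f <;> simp [pvBfsA]

-- B's scan only appends: it extends the order list
lemma pvBfoldExt (cs : List String) (ord : List String) :
    ∃ t, cs.foldl pvIns ord = ord ++ t := by
  induction cs generalizing ord with
  | nil => exact ⟨[], by simp⟩
  | cons c cs ih =>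
    simp only [List.foldl_cons]
    by_cases h : ord.contains c
    · rw [show pvIns ord c = ord from by simp only [pvIns]; rw [if_pos h]]
      exact ih ord
    · rw [show pvIns ord c = ord ++ [c] from by simp only [pvIns]; rw [if_neg h]]
      obtain ⟨t, ht⟩ := ih (ord ++ [c])
      exact ⟨c :: t, by rw [ht]; simp⟩

-- A's inner fold, on a state whose visited set IS the order list, equals B's scan
lemma pvInner (p : String) (cs : List String) :
    ∀ (ord : List String) (e : List (String × String)) (q : List String),
    cs.foldl (fun st c => pvAStep1 p c st) (ord, e, q)
      = (cs.foldl pvIns ord, e ++ cs.map (fun c => (p, c)),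
         q ++ (cs.foldl pvIns ord).drop ord.length) := by
  induction cs with
  | nil => intro ord e q; simp
  | cons c cs ih =>
    intro ord e q
    simp only [List.foldl_cons]
    by_cases h : ord.contains c
    · rw [show pvAStep1 p c (ord, e, q) = (ord, e ++ [(p, c)], q) from by
        simp only [pvAStep1, pvSetContains]; rw [if_pos h]]
      rw [show pvIns ord c = ord from by simp only [pvIns]; rw [if_pos h]]
      rw [ih ord (e ++ [(p, c)]) q]
      simp
    · rw [show pvAStep1 p c (ord, e, q) = (ord ++ [c], e ++ [(p, c)], q ++ [c]) from by
        simp only [pvAStep1, pvSetContains, pvSetAdd]; rw [if_neg h, if_neg h]]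
      rw [show pvIns ord c = ord ++ [c] from by simp only [pvIns]; rw [if_neg h]]
      rw [ih (ord ++ [c]) (e ++ [(p, c)]) (q ++ [c])]
      obtain ⟨t, ht⟩ := pvBfoldExt cs (ord ++ [c])
      rw [ht]
      have h1 : (ord ++ [c] ++ t).drop ord.length = c :: t := by
        rw [List.append_assoc, List.drop_append_of_le_length (Nat.le_refl _)]
        simp
      have h2 : (ord ++ [c] ++ t).drop (ord ++ [c]).length = t := List.drop_left
      rw [h1]
      rw [h2]
      simp

-- appending a fresh element strictly decreases the unvisited count
lemma pvUnvAdd (allc : List String) (n : List String) (c : String)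
    (hc : c ∈ allc) (hn : ¬ n.contains c = true) :
    pvUnv allc (n ++ [c]) + 1 ≤ pvUnv allc n := by
  have hpt : ∀ x ∈ allc, (!((n ++ [c]).contains x)) = ((!(x == c)) && !(n.contains x)) := by
    intro x _
    by_cases hxc : x = c
    · subst hxc; simp
    · simp [hxc]
  unfold pvUnv
  rw [List.filter_congr hpt]
  have hff : allc.filter (fun x => (!(x == c)) && !(n.contains x))
      = (allc.filter (fun x => !(n.contains x))).filter (fun x => !(x == c)) := by
    rw [List.filter_filter]
  rw [hff]
  have hcmem : c ∈ allc.filter (fun x => !(n.contains x)) := by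
    rw [List.mem_filter]
    exact ⟨hc, by simpa using hn⟩
  have : ((allc.filter (fun x => !(n.contains x))).filter (fun x => !(x == c))).length
      < (allc.filter (fun x => !(n.contains x))).length := by
    apply List.length_filter_lt_length_iff_exists.mpr
    exact ⟨c, hcmem, by simp⟩
  omega

-- B's scan does not increase (unvisited + length) of the order list
lemma pvMeasure (allc cs : List String) (hcs : ∀ c ∈ cs, c ∈ allc) :
    ∀ ord : List String,
      pvUnv allc (cs.foldl pvIns ord) + (cs.foldl pvIns ord).length
      ≤ pvUnv allc ord + ord.length := by
  induction cs with
  | nil => intro ord; simp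
  | cons c cs ih =>
    intro ord
    simp only [List.foldl_cons]
    by_cases h : ord.contains c
    · rw [show pvIns ord c = ord from by simp only [pvIns]; rw [if_pos h]]
      exact ih (fun x hx => hcs x (List.mem_cons_of_mem _ hx)) ord
    · rw [show pvIns ord c = ord ++ [c] from by simp only [pvIns]; rw [if_neg h]]
      have h1 := ih (fun x hx => hcs x (List.mem_cons_of_mem _ hx)) (ord ++ [c])
      have h2 := pvUnvAdd allc ord c (hcs c List.mem_cons_self) h
      simp only [List.length_append, List.length_cons, List.length_nil] at h1 ⊢
      omega

-- every child returned by a lookup is among the flattened map values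
lemma pvLookupSub (cm : List (String × List String)) (p c : String)
    (h : c ∈ (PySem.Dict.ofList cm).getD p []) : c ∈ cm.flatMap (fun kv => kv.2) := by
  induction cm using List.reverseRecOn with
  | nil =>
    rw [show PySem.Dict.ofList ([] : List (String × List String)) = PySem.Dict.empty from rfl,
        PySem.Dict.getD_empty] at h
    simp at h
  | append_singleton l kv ih =>
    have hof : PySem.Dict.ofList (l ++ [kv]) = (PySem.Dict.ofList l).insert kv.1 kv.2 := by
      simp [PySem.Dict.ofList, PySem.Dict.update, List.foldl_append]
    rw [hof, PySem.Dict.getD_insert] at h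
    rw [List.flatMap_append]
    by_cases hp : p = kv.1
    · rw [if_pos hp] at h
      exact List.mem_append_right _ (by simp [h])
    · rw [if_neg hp] at h
      exact List.mem_append_left _ (ih h)

-- pvGrow only appends: the order list is extended, never rewritten
lemma pvGrowExt (ch : PySem.Dict String (List String)) (f : Nat) :
    ∀ (ord : List String) (i : Nat), ∃ t, pvGrow ch f ord i = ord ++ t := by
  induction f with
  | zero => intro ord i; exact ⟨[], by simp [pvGrow]⟩
  | succ f ih =>
    intro ord i
    by_cases h : i < ord.length
    · rw [show pvGrow ch (f + 1) ord i = pvGrow ch f (pvNext ch ord ord[i]) (i + 1) from by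
        simp [pvGrow, h]]
      obtain ⟨t1, ht1⟩ := pvBfoldExt (pvSrt ch ord[i]) ord
      obtain ⟨t2, ht2⟩ := ih (pvNext ch ord ord[i]) (i + 1)
      exact ⟨t1 ++ t2, by rw [ht2, pvNext, ht1, List.append_assoc]⟩
    · exact ⟨[], by simp [pvGrow, h]⟩

-- lockstep: A's queue BFS, on a state whose set is the order list and whose queue is its
-- unprocessed suffix, equals B's cursor loop plus the separate edge pass
lemma pvLock (ch : PySem.Dict String (List String)) (allc : List String)
    (hsub : ∀ p c, c ∈ ch.getD p [] → c ∈ allc) (f : Nat) :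
    ∀ (ord : List String) (i : Nat) (e : List (String × String)),
      (ord.length - i) + pvUnv allc ord ≤ f →
      pvBfsA ch f (ord, e, ord.drop i)
        = (pvGrow ch f ord i, e ++ ((pvGrow ch f ord i).drop i).flatMap (pvEdge ch)) := by
  induction f with
  | zero =>
    intro ord i e hm
    have hi : ord.length ≤ i := by omega
    rw [List.drop_eq_nil_of_le hi, pvBfsA_nil]
    simp [pvGrow, List.drop_eq_nil_of_le hi]
  | succ f ih =>
    intro ord i e hm
    by_cases hi : i < ord.length
    · have hdrop : ord.drop i = ord[i] :: ord.drop (i + 1) := List.drop_eq_getElem_cons hi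
      have hstep : pvBfsA ch (f + 1) (ord, e, ord.drop i)
          = pvBfsA ch f (pvAStep ch ord[i] (ord, e, ord.drop (i + 1))) := by
        rw [hdrop]; rfl
      rw [hstep]
      rw [show pvAStep ch ord[i] (ord, e, ord.drop (i + 1))
          = (pvSrt ch ord[i]).foldl (fun st c => pvAStep1 ord[i] c st) (ord, e, ord.drop (i + 1)) from rfl]
      rw [pvInner ord[i] (pvSrt ch ord[i]) ord e (ord.drop (i + 1))]
      obtain ⟨t1, ht1⟩ := pvBfoldExt (pvSrt ch ord[i]) ord
      set O := (pvSrt ch ord[i]).foldl pvIns ord with hO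
      have hqueue : ord.drop (i + 1) ++ O.drop ord.length = O.drop (i + 1) := by
        rw [ht1, List.drop_left, List.drop_append_of_le_length (by omega)]
      rw [hqueue]
      have hOlen : ord.length ≤ O.length := by rw [ht1]; simp
      have hmeas := pvMeasure allc (pvSrt ch ord[i])
        (fun c hc => hsub ord[i] c ((PySem.List.mem_sorted _ _ _ _).mp hc)) ord
      rw [← hO] at hmeas
      have hm' : (O.length - (i + 1)) + pvUnv allc O ≤ f := by omega
      rw [ih O (i + 1) (e ++ (pvSrt ch ord[i]).map (fun c => (ord[i], c))) hm']
      have hgrow : pvGrow ch (f + 1) ord i = pvGrow ch f O (i + 1) := by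
        simp only [pvGrow, hi, dif_pos]
        rfl
      rw [hgrow]
      obtain ⟨t2, ht2⟩ := pvGrowExt ch f O (i + 1)
      have hGdrop : (pvGrow ch f O (i + 1)).drop i
          = ord[i] :: (pvGrow ch f O (i + 1)).drop (i + 1) := by
        rw [ht2, ht1, List.append_assoc]
        rw [List.drop_append_of_le_length (by omega),
            List.drop_append_of_le_length (by omega), hdrop]
        rfl
      rw [hGdrop]
      simp [pvEdge]
    · have hnil : ord.drop i = [] := List.drop_eq_nil_of_le (by omega)
      rw [hnil, pvBfsA_nil]
      simp [pvGrow, hi, hnil]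

-- ===== VERDICT (by name: the statement is the Claim_ definition above) =====
theorem collect_reachable_edges_spec : Claim_equal_collect_reachable_edges := by
  unfold Claim_equal_collect_reachable_edges Spec_collect_reachable_edges
  intro root cm _
  unfold collect_reachable_edges collect_reachable_edges_alt
  have hsub : ∀ p c, c ∈ (PySem.Dict.ofList cm).getD p [] → c ∈ cm.flatMap (fun kv => kv.2) :=
    fun p c h => pvLookupSub cm p c h
  have hμ : (([root] : List String).length - 0)
      + pvUnv (cm.flatMap (fun kv => kv.2)) [root] ≤ 1 + (cm.map (fun kv => kv.2.length)).sum := by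
    have h1 : pvUnv (cm.flatMap (fun kv => kv.2)) [root]
        ≤ (cm.flatMap (fun kv => kv.2)).length := by
      unfold pvUnv; exact List.length_filter_le _ _
    have h2 : (cm.flatMap (fun kv => kv.2)).length = (cm.map (fun kv => kv.2.length)).sum := by
      rw [List.length_flatMap]
    simp only [List.length_cons, List.length_nil]
    omega
  have hlock := pvLock (PySem.Dict.ofList cm) (cm.flatMap (fun kv => kv.2)) hsub
    (1 + (cm.map (fun kv => kv.2.length)).sum) [root] 0 [] hμ
  simp only [List.drop_zero] at hlock
  rw [show PySem.Set.ofList [root] = [root] from rfl]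
  rw [hlock]
  rfl
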